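-- pv_equiv track=rewrite | github.com/dajeong-kimm/algorithm | 백준/Gold/17140. 이차원 배열과 연산/이차원 배열과 연산.py | sort_new
-- ===== SOURCE A (Python) =====
-- def sort_new(matrix,RC):
--     sorted_matrix = []
--     max_count = 0
--
--     for i in range(len(matrix)):
--         B = []
--         dic = dict()
--         for j in range(len(matrix[i])):
--             if matrix[i][j] != 0:
--                 if matrix[i][j] not in dic:
--                     dic[matrix[i][j]] = 1
--                 else:
--                     dic[matrix[i][j]] += 1
--         for key,value in dic.items():
--             B.append([key,value])
--         B.sort(key=lambda x:[x[1],x[0]])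
--         C = sum(B,[])
--         max_count = max(max_count,len(C))
--         sorted_matrix.append(C)
--     for i in sorted_matrix:
--         i += [0]*(max_count-len(i))
--         if len(i)>100:
--             i = i[:100]
--     return sorted_matrix if RC == "R" else list(zip(*sorted_matrix))
-- ===== SOURCE B (Python) =====
-- def sort_new(matrix, RC):
--     # Sort-then-run-length counting instead of dict counting; comprehension flatten; pad after.
--     rows = []
--     for row in matrix:
--         nz = sorted(x for x in row if x != 0)
--         groups = []
--         i = 0
--         n = len(nz)
--         while i < n:
--             j = i + 1
--             while j < n and nz[j] == nz[i]:
--                 j += 1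
--             groups.append((nz[i], j - i))
--             i = j
--         groups.sort(key=lambda g: (g[1], g[0]))
--         rows.append([x for g in groups for x in g])
--     width = max((len(r) for r in rows), default=0)
--     padded = [r + [0] * (width - len(r)) for r in rows]
--     return padded if RC == "R" else list(zip(*padded))
-- ===== Notes on version B (the rewrite author's own statement) =====
-- stated objective: alternative
-- what changed: Per row, B collects and sorts the nonzero values and counts them with a run-length pass over the sorted list instead of A's dict-based frequency counting, builds the flattened row by comprehension, and pads rows computed-width-last; same exact output including the tuple-transpose for RC != 'R'.
import Mathlib
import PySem

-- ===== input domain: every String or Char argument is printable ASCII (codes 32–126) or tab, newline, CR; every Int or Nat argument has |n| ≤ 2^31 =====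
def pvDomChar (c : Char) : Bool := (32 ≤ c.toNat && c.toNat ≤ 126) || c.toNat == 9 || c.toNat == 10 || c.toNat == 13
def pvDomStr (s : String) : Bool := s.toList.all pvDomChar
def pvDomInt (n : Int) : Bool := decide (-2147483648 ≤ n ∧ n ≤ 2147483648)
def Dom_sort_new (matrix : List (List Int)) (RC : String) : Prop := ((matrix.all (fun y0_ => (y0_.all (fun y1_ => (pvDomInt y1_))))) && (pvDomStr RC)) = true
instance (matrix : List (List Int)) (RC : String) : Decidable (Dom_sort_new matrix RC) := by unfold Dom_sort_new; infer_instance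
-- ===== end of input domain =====

-- B replaces A's hash-table (dict) frequency counting by sort-then-run-length grouping and pads
-- via comprehensions; same return value everywhere (alternative decomposition, no speed claim).

-- shared helper: exact port of Python's list(zip(*rows)) specialised to List Int rows
-- (number of columns = the minimum row length; [] when there are no rows); `zip` is a
-- stdlib call in both Pythons, so both ports use this helper.
def pvZipStar (rows : List (List Int)) : List (List Int) :=
  match (rows.map List.length).min? with
  | none => []
  | some n => (List.range n).map (fun k => rows.map (fun r => r.getD k 0))

-- ===== PORT A =====
-- the body of A's outer loop: count nonzero values in a dict, list its items
-- (a Python 2-list [key,value] is carried as the pair (key,value)), sort by the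
-- key [x[1],x[0]], flatten with sum(B,[]).
def pvRowA (row : List Int) : List Int :=
  let dic := (PySem.List.pyRange 0 (PySem.List.len row)).foldl (fun d j =>
      let x := PySem.List.pyGetD row j 0
      if x ≠ 0 then
        (if d.contains x = false then d.insert x 1 else d.insert x (d.getD x 0 + 1))
      else d) PySem.Dict.empty
  let B := dic.items.foldl (fun b kv => b ++ [kv]) ([] : List (Int × Int))
  let Bs := PySem.List.sorted2 B (fun x => x.2) (fun x => x.1)
  Bs.foldl (fun c kv => c ++ [kv.1, kv.2]) []

def sort_new (matrix : List (List Int)) (RC : String) : List (List Int) :=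
  let res := (PySem.List.pyRange 0 (PySem.List.len matrix)).foldl (fun acc i =>
      let C := pvRowA (PySem.List.pyGetD matrix i [])
      (acc.1 ++ [C], max acc.2 (C.length : Int))) (([], 0) : List (List Int) × Int)
  -- final loop: `i += [0]*(max_count-len(i))` pads each row in place;
  -- `i = i[:100]` only rebinds the loop variable and never changes sorted_matrix (no-op).
  let sm := res.1.map (fun i => i ++ PySem.List.pyRepeat [0] (res.2 - (i.length : Int)))
  if RC == "R" then sm else pvZipStar sm

-- ===== PORT B =====
-- run-length pass over the sorted nonzero values (B's while loop over suffixes)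
def pvRuns (s : List Int) : List (Int × Int) :=
  match s with
  | [] => []
  | v :: t => (v, 1 + ((t.takeWhile (· == v)).length : Int)) :: pvRuns (t.dropWhile (· == v))
termination_by s.length
decreasing_by simpa using Nat.lt_succ_of_le (List.length_dropWhile_le (· == v) t)

def pvRowAlt (row : List Int) : List Int :=
  let nz := PySem.List.sorted (row.filter (fun x => x != 0)) (fun x => x)
  let groups := PySem.List.sorted2 (pvRuns nz) (fun g => g.2) (fun g => g.1)
  groups.flatMap (fun g => [g.1, g.2])

def sort_new_alt (matrix : List (List Int)) (RC : String) : List (List Int) :=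
  let rows := matrix.map pvRowAlt
  let width := PySem.List.maxD (rows.map (fun r => (r.length : Int))) (fun x => x) 0
  let padded := rows.map (fun r => r ++ List.replicate (width - (r.length : Int)).toNat 0)
  if RC == "R" then padded else pvZipStar padded

-- ===== PRECONDITION & SPEC =====
def Spec_sort_new (matrix : List (List Int)) (RC : String) (out : List (List Int)) : Prop := out = sort_new_alt matrix RC
instance (matrix : List (List Int)) (RC : String) (out : List (List Int)) : Decidable (Spec_sort_new matrix RC out) := by unfold Spec_sort_new; infer_instance

-- ===== CLAIM (what is proved, stated in full; the proofs are below) =====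
def Claim_equal_sort_new : Prop := ∀ (matrix : List (List Int)) (RC : String), Dom_sort_new matrix RC → Spec_sort_new matrix RC (sort_new matrix RC)

-- ===== LEMMAS AND PROOFS =====

-- sorted2 with Int keys is sorted with the lexicographic product key
theorem pv_sorted2_lex {α : Type} (xs : List α) (k1 k2 : α → Int) :
    PySem.List.sorted2 xs k1 k2 = PySem.List.sorted xs (fun a => toLex (k1 a, k2 a)) := by
  have hb : (fun (a b : α) => decide (k1 a < k1 b) || (!decide (k1 b < k1 a) && decide (k2 a < k2 b)))
      = fun a b => decide (toLex (k1 a, k2 a) < toLex (k1 b, k2 b)) := by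
    funext a b
    apply Bool.eq_iff_iff.mpr
    simp only [Bool.or_eq_true, Bool.and_eq_true, Bool.not_eq_true', decide_eq_true_iff,
      decide_eq_false_iff_not]
    rw [Prod.Lex.lt_iff]
    simp only [ofLex_toLex]
    constructor
    · rintro (h | ⟨h1, h2⟩)
      · exact Or.inl h
      · rcases lt_trichotomy (k1 a) (k1 b) with h' | h' | h'
        · exact Or.inl h'
        · exact Or.inr ⟨h', h2⟩
        · exact absurd h' h1
    · rintro (h | ⟨h1, h2⟩)
      · exact Or.inl h
      · exact Or.inr ⟨by omega, h2⟩
  show xs.foldl (fun acc x => PySem.List.insertBy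
      (fun a b => decide (k1 a < k1 b) || (!decide (k1 b < k1 a) && decide (k2 a < k2 b)))
      x acc) [] = _
  rw [PySem.List.sorted_eq_foldl_insertBy, hb]

theorem pv_key_inj : Function.Injective (fun p : Int × Int => toLex (p.2, p.1)) := by
  intro a b h
  have h' : ((a.2, a.1) : Int × Int) = (b.2, b.1) := by
    have := congrArg ofLex h
    simpa [ofLex_toLex] using this
  have h2 := Prod.ext_iff.mp h'
  exact Prod.ext h2.2 h2.1

theorem pv_bne_zero (x : Int) : (x != 0) = decide (x ≠ 0) := by
  apply Bool.eq_iff_iff.mpr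
  simp [bne_iff_ne]

-- A's dict-building loop is Counter of the nonzero values
theorem pv_dic_eq (row : List Int) :
    ((PySem.List.pyRange 0 (PySem.List.len row)).foldl (fun d j =>
      let x := PySem.List.pyGetD row j 0
      if x ≠ 0 then
        (if d.contains x = false then d.insert x 1 else d.insert x (d.getD x 0 + 1))
      else d) PySem.Dict.empty)
    = PySem.Dict.counter (row.filter (fun x => x != 0)) := by
  show ((PySem.List.pyRange 0 (PySem.List.len row)).foldl (fun d j =>
      (fun (d : PySem.Dict Int Int) (x : Int) => if x ≠ 0 then
        (if d.contains x = false then d.insert x 1 else d.insert x (d.getD x 0 + 1))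
      else d) d (PySem.List.pyGetD row j 0)) PySem.Dict.empty) = _
  rw [PySem.List.foldl_pyRange_pyGetD row 0
    (fun (d : PySem.Dict Int Int) (x : Int) => if x ≠ 0 then
        (if d.contains x = false then d.insert x 1 else d.insert x (d.getD x 0 + 1))
      else d) PySem.Dict.empty (le_refl 0)]
  simp only [Int.toNat_zero, List.drop_zero]
  rw [PySem.List.foldl_ite_eq_foldl_filter (fun x => x ≠ 0)]
  rw [PySem.List.foldl_congr_mem' _ _ (fun d x => d.insert x (d.getD x 0 + 1)) _
    (by
      intro x _ d
      by_cases hc : d.contains x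
      · simp [hc]
      · have h0 : d.getD x 0 = 0 := by
          have := (PySem.Dict.get?_eq_none_iff_contains d x).mpr (by simpa using hc)
          simp [PySem.Dict.getD, this]
        simp [hc, h0])]
  rw [PySem.Dict.foldl_insert_getD_add_one_eq_counter]
  congr 1
  exact List.filter_congr (fun x _ => (pv_bne_zero x).symm)

-- run-length pass over a sorted list: each produced pair is (value, total count),
-- every value is produced, and the produced values are distinct
theorem pv_runs_spec (s : List Int) (h : s.Pairwise (· ≤ ·)) :
    (∀ q ∈ pvRuns s, q.1 ∈ s ∧ q.2 = (s.count q.1 : Int)) ∧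
    (∀ k ∈ s, (k, (s.count k : Int)) ∈ pvRuns s) ∧
    ((pvRuns s).map Prod.fst).Nodup := by
  induction s using pvRuns.induct with
  | case1 => simp [pvRuns]
  | case2 v t ih =>
    have ht : t.Pairwise (· ≤ ·) := (List.pairwise_cons.mp h).2
    have hvt : ∀ x ∈ t, v ≤ x := (List.pairwise_cons.mp h).1
    set p := t.takeWhile (· == v) with hpdef
    set d := t.dropWhile (· == v) with hddef
    have hpd : p ++ d = t := List.takeWhile_append_dropWhile
    have hp : ∀ x ∈ p, x = v := fun x hx => by
      simpa using List.mem_takeWhile_imp hx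
    have hdsub : d.Sublist t := List.dropWhile_sublist _
    have hdp : d.Pairwise (· ≤ ·) := ht.sublist hdsub
    have hvd : v ∉ d := by
      intro hv
      obtain ⟨h0, d', hd⟩ := List.exists_cons_of_ne_nil (List.ne_nil_of_mem hv)
      have hh' : h0 ≠ v := by
        have h5 := List.head?_dropWhile_not (fun x => x == v) t
        rw [← hddef, hd] at h5
        have h6 : (h0 == v) = false := h5
        intro he
        rw [he] at h6
        simp at h6
      rw [hd] at hdp hv
      rcases List.mem_cons.mp hv with rfl | hv'
      · exact hh' rfl
      · have h1 : h0 ≤ v := (List.pairwise_cons.mp hdp).1 v hv'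
        have h2 : v ≤ h0 := hvt h0 (hdsub.subset (hd ▸ List.mem_cons_self))
        exact hh' (le_antisymm h1 h2)
    have hdt : ∀ x ∈ d, x ∈ t := fun x hx => hdsub.subset hx
    have hcp : p.count v = p.length := List.count_eq_length.mpr (fun b hb => (hp b hb).symm)
    have hcpk : ∀ k, k ≠ v → p.count k = 0 :=
      fun k hk => List.count_eq_zero.mpr (fun hm => hk (hp k hm))
    have hcv : (v :: t).count v = 1 + p.length := by
      rw [← hpd]
      simp [List.count_append, hcp, List.count_eq_zero.mpr hvd]
      omega
    have hck : ∀ k, k ≠ v → (v :: t).count k = d.count k := by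
      intro k hk
      rw [← hpd]
      simp [List.count_append, hcpk k hk, Ne.symm hk]
    obtain ⟨ihA, ihB, ihC⟩ := ih hdp
    rw [pvRuns]
    refine ⟨?_, ?_, ?_⟩
    · intro q hq
      rcases List.mem_cons.mp hq with rfl | hq'
      · refine ⟨List.mem_cons_self, ?_⟩
        simp only [hcv]
        push_cast
        ring
      · obtain ⟨hq1, hq2⟩ := ihA q hq'
        have hne : q.1 ≠ v := fun he => hvd (he ▸ hq1)
        exact ⟨List.mem_cons_of_mem _ (hdt _ hq1), by rw [hck q.1 hne]; exact hq2⟩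
    · intro k hk
      by_cases hkv : k = v
      · rw [hkv, hcv]
        have hc1 : ((1 + p.length : Nat) : Int) = 1 + (p.length : Int) := by push_cast; ring
        rw [hc1]
        exact List.mem_cons_self
      · have hkt : k ∈ t := by
          rcases List.mem_cons.mp hk with rfl | h'
          · exact absurd rfl hkv
          · exact h'
        have hkd : k ∈ d := by
          rw [← hpd] at hkt
          rcases List.mem_append.mp hkt with h' | h'
          · exact absurd (hp _ h') hkv
          · exact h'
        have := ihB k hkd
        rw [hck k hkv]
        exact List.mem_cons_of_mem _ this
    · simp only [List.map_cons, List.nodup_cons]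
      refine ⟨?_, ihC⟩
      intro hm
      obtain ⟨q, hq, hq1⟩ := List.mem_map.mp hm
      exact hvd (hq1 ▸ (ihA q hq).1)

-- per-row agreement: A's dict/sort row equals B's sort/run-length row
theorem pv_row_eq (row : List Int) : pvRowA row = pvRowAlt row := by
  unfold pvRowA pvRowAlt
  simp only [pv_dic_eq, PySem.List.foldl_append_singleton_eq_self, List.nil_append]
  rw [PySem.List.foldl_append_eq_flatMap (fun kv : Int × Int => [kv.1, kv.2])]
  rw [List.nil_append]
  set nz := row.filter (fun x => x != 0) with hnz
  have hitems : (PySem.Dict.counter nz).items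
      = (PySem.Set.ofList nz).map (fun k => (k, (nz.count k : Int))) :=
    PySem.Dict.items_counter nz
  congr 1
  rw [pv_sorted2_lex, pv_sorted2_lex, hitems]
  apply PySem.List.sorted_eq_sorted_of_perm _ _ _ pv_key_inj
  -- the items of Counter(nz) are a permutation of the run-length pairs of sorted(nz)
  have hs := pv_runs_spec (PySem.List.sorted nz (fun x => x))
    (PySem.List.sorted_pairwise nz (fun x => x))
  obtain ⟨hA, hB, hC⟩ := hs
  have hperm : (PySem.List.sorted nz (fun x => x)).Perm nz := PySem.List.sorted_perm nz _ _
  have hmemS : ∀ x, x ∈ PySem.List.sorted nz (fun x => x) ↔ x ∈ nz :=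
    fun x => PySem.List.mem_sorted nz _ _ x
  have hcount : ∀ x, (PySem.List.sorted nz (fun x => x)).count x = nz.count x :=
    fun x => hperm.count_eq x
  have hnodup1 : ((PySem.Set.ofList nz).map (fun k => (k, (nz.count k : Int)))).Nodup :=
    (PySem.Set.nodup_ofList nz).map (fun a b hab => by
      simpa using congrArg Prod.fst hab)
  have hnodup2 : (pvRuns (PySem.List.sorted nz (fun x => x))).Nodup :=
    hC.of_map
  rw [List.perm_ext_iff_of_nodup hnodup1 hnodup2]
  intro q
  constructor
  · intro hq
    obtain ⟨k, hk, rfl⟩ := List.mem_map.mp hq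
    have hk' : k ∈ nz := (PySem.Set.mem_ofList nz k).mp hk
    have := hB k ((hmemS k).mpr hk')
    rwa [hcount k] at this
  · intro hq
    obtain ⟨h1, h2⟩ := hA q hq
    refine List.mem_map.mpr ⟨q.1, (PySem.Set.mem_ofList nz q.1).mpr ((hmemS q.1).mp h1), ?_⟩
    rw [← hcount q.1, ← h2]

-- max with default 0 over nonnegative Ints is the running max from 0
theorem pv_maxD_eq (xs : List Int) (h : ∀ x ∈ xs, 0 ≤ x) :
    PySem.List.maxD xs (fun x => x) 0 = xs.foldl max 0 := by
  cases xs with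
  | nil =>
    have h0 : PySem.List.max? ([] : List Int) (fun x => x) = none := by
      simp [ (PySem.List.max?_eq_none_iff ([] : List Int) (fun x => x)).mpr rfl]
    simp [PySem.List.maxD, h0]
  | cons x t =>
    have hx : max 0 x = x := max_eq_right (h x List.mem_cons_self)
    have : PySem.List.maxD (x :: t) (fun x => x) 0 = t.foldl max x := by
      simp [PySem.List.maxD, PySem.List.max?_id_cons]
    rw [this, List.foldl_cons, hx]

-- ===== VERDICT (by name: the statement is the Claim_ definition above) =====
theorem sort_new_spec : Claim_equal_sort_new := by
  intro matrix RC _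
  unfold Spec_sort_new sort_new sort_new_alt
  rw [PySem.List.foldl_pyRange_pyGetD matrix []
    (fun acc row => (acc.1 ++ [pvRowA row], max acc.2 ((pvRowA row).length : Int)))
    (([], 0) : List (List Int) × Int) (le_refl 0)]
  simp only [Int.toNat_zero, List.drop_zero]
  rw [PySem.List.foldl_prod_mk (fun l row => l ++ [pvRowA row])
    (fun m row => max m ((pvRowA row).length : Int)) matrix [] 0]
  simp only [PySem.List.foldl_append_singleton_eq_map, List.nil_append]
  have hrow : matrix.map pvRowA = matrix.map pvRowAlt :=
    List.map_congr_left (fun r _ => pv_row_eq r)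
  rw [hrow]
  have hmax : matrix.foldl (fun m row => max m ((pvRowA row).length : Int)) 0
      = PySem.List.maxD ((matrix.map pvRowAlt).map (fun r => (r.length : Int))) (fun x => x) 0 := by
    rw [pv_maxD_eq _ (by
      intro x hx
      obtain ⟨r, _, rfl⟩ := List.mem_map.mp hx
      exact Int.natCast_nonneg _)]
    rw [List.map_map, List.foldl_map]
    exact PySem.List.foldl_congr_mem' _ _ _ _ (fun row _ m => by rw [pv_row_eq row]; rfl)
  rw [hmax]
  have hpad : ∀ (i : List Int) (w : Int),
      i ++ PySem.List.pyRepeat [0] (w - (i.length : Int))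
        = i ++ List.replicate (w - (i.length : Int)).toNat 0 := by
    intro i w
    rw [PySem.List.pyRepeat_singleton]
  simp only [hpad]
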